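-- pv_equiv track=rewrite | github.com/lykos1974/sm | pnf_mvp/strategy_historical_backfill.py | _build_shadow_mismatch_details
-- ===== SOURCE A (Python) =====
-- from typing import TYPE_CHECKING, Any, Dict, List, Tuple
--
-- def _build_shadow_mismatch_details(legacy_structure: dict, incremental_structure: dict) -> Dict[str, Any]:
--     legacy_keys = set(legacy_structure.keys())
--     incremental_keys = set(incremental_structure.keys())
--     return {
--         "missing_in_incremental": sorted(legacy_keys - incremental_keys),
--         "extra_in_incremental": sorted(incremental_keys - legacy_keys),
--         "value_differences": sorted(
--             key
--             for key in (legacy_keys & incremental_keys)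
--             if legacy_structure.get(key) != incremental_structure.get(key)
--         ),
--     }
-- ===== SOURCE B (Python) =====
-- def _build_shadow_mismatch_details(legacy_structure: dict, incremental_structure: dict):
--     # Sort both item lists by key once, then classify with a two-pointer merge:
--     # the three result lists come out already in sorted order.
--     li = sorted(legacy_structure.items(), key=lambda kv: kv[0])
--     ri = sorted(incremental_structure.items(), key=lambda kv: kv[0])
--     missing, extra, diffs = [], [], []
--     i = j = 0
--     while i < len(li) and j < len(ri):
--         lk, lv = li[i]
--         rk, rv = ri[j]
--         if lk < rk:
--             missing.append(lk)
--             i += 1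
--         elif rk < lk:
--             extra.append(rk)
--             j += 1
--         else:
--             if lv != rv:
--                 diffs.append(lk)
--             i += 1
--             j += 1
--     missing.extend(k for k, _ in li[i:])
--     extra.extend(k for k, _ in ri[j:])
--     return {
--         "missing_in_incremental": missing,
--         "extra_in_incremental": extra,
--         "value_differences": diffs,
--     }
-- ===== Notes on version B (the rewrite author's own statement) =====
-- stated objective: alternative
-- what changed: Replaces the set-algebra (build two key sets, three set operations, sort each result) by a sort-then-merge algorithm: both item lists are sorted by key once and a single two-pointer merge classifies keys into missing/extra/value_differences, emitting all three lists already in sorted order with no final sorted() calls.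
import Mathlib
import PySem

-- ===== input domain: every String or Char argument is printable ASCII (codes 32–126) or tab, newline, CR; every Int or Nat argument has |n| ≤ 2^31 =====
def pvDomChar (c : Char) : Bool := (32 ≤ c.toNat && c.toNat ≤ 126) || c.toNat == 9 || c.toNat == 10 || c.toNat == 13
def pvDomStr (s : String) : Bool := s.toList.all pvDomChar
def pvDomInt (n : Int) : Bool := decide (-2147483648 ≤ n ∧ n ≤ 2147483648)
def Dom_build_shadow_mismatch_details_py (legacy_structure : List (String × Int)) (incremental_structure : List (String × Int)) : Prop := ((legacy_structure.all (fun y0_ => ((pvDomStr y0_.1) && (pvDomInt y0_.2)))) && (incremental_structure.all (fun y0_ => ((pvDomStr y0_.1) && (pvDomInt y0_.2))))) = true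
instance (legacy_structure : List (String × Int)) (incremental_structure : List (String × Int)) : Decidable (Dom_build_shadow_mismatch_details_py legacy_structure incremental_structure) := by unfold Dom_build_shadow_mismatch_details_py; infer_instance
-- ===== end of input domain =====

-- B replaces A's set algebra (two key sets, three set operations, each result sorted) by a
-- sort-then-merge algorithm: both item lists are sorted by key once and a single two-pointer
-- merge classifies every key, emitting the three lists already in sorted order; objective:
-- alternative algorithm, same output on every input.

-- ===== PORT A =====
-- literal port of A: build both key sets, three set operations, each result sorted
def build_shadow_mismatch_details_py (legacy_structure : List (String × Int)) (incremental_structure : List (String × Int)) : List (String × List String) :=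
  let legacy : PySem.Dict String Int := PySem.Dict.ofList legacy_structure
  let incremental : PySem.Dict String Int := PySem.Dict.ofList incremental_structure
  let legacy_keys : PySem.Set String := PySem.Set.ofList legacy.keys
  let incremental_keys : PySem.Set String := PySem.Set.ofList incremental.keys
  [("missing_in_incremental", PySem.List.sorted (PySem.Set.diff legacy_keys incremental_keys) (fun x => x) false),
   ("extra_in_incremental", PySem.List.sorted (PySem.Set.diff incremental_keys legacy_keys) (fun x => x) false),
   ("value_differences", PySem.List.sorted ((PySem.Set.inter legacy_keys incremental_keys).filter (fun k => legacy.get? k != incremental.get? k)) (fun x => x) false)]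

-- ===== PORT B =====
-- literal port of B's while loop: a two-pointer merge over the two key-sorted item lists,
-- classifying each key into (missing, extra, diffs); the trailing extends are the base cases
def mergeClassify : List (String × Int) → List (String × Int) → List String × List String × List String
  | [], ys => ([], ys.map Prod.fst, [])
  | x :: xs, [] => ((x :: xs).map Prod.fst, [], [])
  | (k1, v1) :: xs, (k2, v2) :: ys =>
    if k1 < k2 then
      let r := mergeClassify xs ((k2, v2) :: ys)
      (k1 :: r.1, r.2.1, r.2.2)
    else if k2 < k1 then
      let r := mergeClassify ((k1, v1) :: xs) ys
      (r.1, k2 :: r.2.1, r.2.2)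
    else
      let r := mergeClassify xs ys
      if v1 != v2 then (r.1, r.2.1, k1 :: r.2.2) else r
termination_by xs ys => xs.length + ys.length

def build_shadow_mismatch_details_py_alt (legacy_structure : List (String × Int)) (incremental_structure : List (String × Int)) : List (String × List String) :=
  let legacy : PySem.Dict String Int := PySem.Dict.ofList legacy_structure
  let incremental : PySem.Dict String Int := PySem.Dict.ofList incremental_structure
  let li := PySem.List.sorted legacy.items (fun kv => kv.1) false
  let ri := PySem.List.sorted incremental.items (fun kv => kv.1) false
  let r := mergeClassify li ri
  [("missing_in_incremental", r.1),
   ("extra_in_incremental", r.2.1),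
   ("value_differences", r.2.2)]

-- ===== PRECONDITION & SPEC =====
def Spec_build_shadow_mismatch_details_py (legacy_structure : List (String × Int)) (incremental_structure : List (String × Int)) (out : List (String × List String)) : Prop := out = build_shadow_mismatch_details_py_alt legacy_structure incremental_structure
instance (legacy_structure : List (String × Int)) (incremental_structure : List (String × Int)) (out : List (String × List String)) : Decidable (Spec_build_shadow_mismatch_details_py legacy_structure incremental_structure out) := by unfold Spec_build_shadow_mismatch_details_py; infer_instance

-- ===== CLAIM (what is proved, stated in full; the proofs are below) =====
def Claim_equal_build_shadow_mismatch_details_py : Prop := ∀ (legacy_structure : List (String × Int)) (incremental_structure : List (String × Int)), Dom_build_shadow_mismatch_details_py legacy_structure incremental_structure → Spec_build_shadow_mismatch_details_py legacy_structure incremental_structure (build_shadow_mismatch_details_py legacy_structure incremental_structure)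

-- ===== LEMMAS AND PROOFS =====

-- the merge over two strictly key-sorted lists computed as three filters
lemma notmem_map_fst {k : String} {l : List (String × Int)} (h : ∀ q ∈ l, k < q.1) :
    k ∉ l.map Prod.fst := by
  intro hm
  obtain ⟨q, hq, hq1⟩ := List.mem_map.mp hm
  exact absurd (hq1 ▸ h q hq) (lt_irrefl k)

lemma exists_cons_iff_of_ne {p y : String × Int} {ys : List (String × Int)} (hne : p.1 ≠ y.1) :
    (∃ q ∈ y :: ys, q.1 = p.1 ∧ q.2 ≠ p.2) ↔ (∃ q ∈ ys, q.1 = p.1 ∧ q.2 ≠ p.2) := by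
  constructor
  · rintro ⟨q, hq, hq1, hq2⟩
    rcases List.mem_cons.mp hq with rfl | hq'
    · exact absurd hq1.symm hne
    · exact ⟨q, hq', hq1, hq2⟩
  · rintro ⟨q, hq, hq1, hq2⟩
    exact ⟨q, List.mem_cons_of_mem _ hq, hq1, hq2⟩

lemma mergeClassify_eq (xs ys : List (String × Int))
    (hx : xs.Pairwise (fun a b => a.1 < b.1)) (hy : ys.Pairwise (fun a b => a.1 < b.1)) :
    mergeClassify xs ys =
      ((xs.filter (fun p => !decide (p.1 ∈ ys.map Prod.fst))).map Prod.fst,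
       (ys.filter (fun p => !decide (p.1 ∈ xs.map Prod.fst))).map Prod.fst,
       (xs.filter (fun p => decide (∃ q ∈ ys, q.1 = p.1 ∧ q.2 ≠ p.2))).map Prod.fst) := by
  induction xs, ys using mergeClassify.induct with
  | case1 ys => simp [mergeClassify]
  | case2 x xs => simp [mergeClassify]
  | case3 k1 v1 xs k2 v2 ys hlt ih =>
    obtain ⟨hxk, hx'⟩ := List.pairwise_cons.mp hx
    obtain ⟨hyk, hy'⟩ := List.pairwise_cons.mp hy
    have hk1 : ∀ q ∈ (k2, v2) :: ys, k1 < q.1 := by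
      intro q hq
      rcases List.mem_cons.mp hq with rfl | hq
      · exact hlt
      · exact lt_trans hlt (hyk q hq)
    have hnm := notmem_map_fst hk1
    rw [show mergeClassify ((k1, v1) :: xs) ((k2, v2) :: ys)
          = (k1 :: (mergeClassify xs ((k2, v2) :: ys)).1,
             (mergeClassify xs ((k2, v2) :: ys)).2.1,
             (mergeClassify xs ((k2, v2) :: ys)).2.2) from by rw [mergeClassify]; simp [hlt],
        ih hx' hy]
    simp only [Prod.mk.injEq]
    refine ⟨?_, ?_, ?_⟩
    · have h1 : k1 ∉ (k2, v2).1 :: List.map Prod.fst ys := by simpa using hnm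
      simp [h1]
    · apply congrArg
      apply List.filter_congr
      intro q hq
      have : ¬ q.1 = k1 := fun h => absurd (h ▸ hk1 q hq) (lt_irrefl _)
      simp [this]
    · have hne : ¬ ∃ q ∈ (k2, v2) :: ys, q.1 = k1 ∧ q.2 ≠ v1 := by
        rintro ⟨q, hq, hq1, -⟩
        exact absurd (hq1 ▸ hk1 q hq) (lt_irrefl _)
      simp only [List.filter_cons]
      rw [if_neg (by simpa using hne)]
  | case4 k1 v1 xs k2 v2 ys hlt1 hlt2 ih =>
    obtain ⟨hxk, hx'⟩ := List.pairwise_cons.mp hx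
    obtain ⟨hyk, hy'⟩ := List.pairwise_cons.mp hy
    have hk2 : ∀ p ∈ (k1, v1) :: xs, k2 < p.1 := by
      intro p hp
      rcases List.mem_cons.mp hp with rfl | hp
      · exact hlt2
      · exact lt_trans hlt2 (hxk p hp)
    have hnm := notmem_map_fst hk2
    rw [show mergeClassify ((k1, v1) :: xs) ((k2, v2) :: ys)
          = ((mergeClassify ((k1, v1) :: xs) ys).1,
             k2 :: (mergeClassify ((k1, v1) :: xs) ys).2.1,
             (mergeClassify ((k1, v1) :: xs) ys).2.2) from by rw [mergeClassify]; simp [hlt1, hlt2],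
        ih hx hy']
    simp only [Prod.mk.injEq]
    refine ⟨?_, ?_, ?_⟩
    · apply congrArg
      apply List.filter_congr
      intro p hp
      have : ¬ p.1 = k2 := fun h => absurd (h ▸ hk2 p hp) (lt_irrefl _)
      simp [this]
    · have h1 : k2 ∉ (k1, v1).1 :: List.map Prod.fst xs := by simpa using hnm
      simp [h1]
    · apply congrArg
      apply List.filter_congr
      intro p hp
      have hne : p.1 ≠ (k2, v2).1 := fun h => absurd (h ▸ hk2 p hp) (lt_irrefl _)
      simp only [decide_eq_decide]
      exact (exists_cons_iff_of_ne hne).symm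
  | case5 k1 v1 xs k2 v2 ys hlt1 hlt2 hv ih =>
    obtain rfl : k1 = k2 := le_antisymm (not_lt.mp hlt2) (not_lt.mp hlt1)
    obtain ⟨hxk, hx'⟩ := List.pairwise_cons.mp hx
    obtain ⟨hyk, hy'⟩ := List.pairwise_cons.mp hy
    rw [show mergeClassify ((k1, v1) :: xs) ((k1, v2) :: ys)
          = ((mergeClassify xs ys).1, (mergeClassify xs ys).2.1,
             k1 :: (mergeClassify xs ys).2.2) from by rw [mergeClassify]; simp [hv],
        ih hx' hy']
    simp only [Prod.mk.injEq]
    refine ⟨?_, ?_, ?_⟩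
    · rw [List.filter_cons_of_neg (by simp), List.filter_congr ?_]
      intro p hp
      have : ¬ p.1 = k1 := fun h => absurd (h ▸ hxk p hp) (lt_irrefl _)
      simp [this]
    · rw [List.filter_cons_of_neg (by simp), List.filter_congr ?_]
      intro q hq
      have : ¬ q.1 = k1 := fun h => absurd (h ▸ hyk q hq) (lt_irrefl _)
      simp [this]
    · have hhead : ∃ q ∈ (k1, v2) :: ys, q.1 = k1 ∧ q.2 ≠ v1 :=
        ⟨(k1, v2), List.mem_cons_self .., rfl,
         fun h => (show v1 ≠ v2 by simpa using hv) h.symm⟩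
      rw [List.filter_cons_of_pos (by simpa using hhead), List.map_cons, List.filter_congr ?_]
      intro p hp
      have hne : p.1 ≠ (k1, v2).1 := fun h => absurd (h ▸ hxk p hp) (lt_irrefl _)
      simp only [decide_eq_decide]
      exact (exists_cons_iff_of_ne hne).symm
  | case6 k1 v1 xs k2 v2 ys hlt1 hlt2 hv ih =>
    obtain rfl : k1 = k2 := le_antisymm (not_lt.mp hlt2) (not_lt.mp hlt1)
    obtain ⟨hxk, hx'⟩ := List.pairwise_cons.mp hx
    obtain ⟨hyk, hy'⟩ := List.pairwise_cons.mp hy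
    rw [show mergeClassify ((k1, v1) :: xs) ((k1, v2) :: ys)
          = mergeClassify xs ys from by rw [mergeClassify]; simp [hv],
        ih hx' hy']
    have hvv : v1 = v2 := by simpa using hv
    simp only [Prod.mk.injEq]
    refine ⟨?_, ?_, ?_⟩
    · rw [List.filter_cons_of_neg (by simp), List.filter_congr ?_]
      intro p hp
      have : ¬ p.1 = k1 := fun h => absurd (h ▸ hxk p hp) (lt_irrefl _)
      simp [this]
    · rw [List.filter_cons_of_neg (by simp), List.filter_congr ?_]
      intro q hq
      have : ¬ q.1 = k1 := fun h => absurd (h ▸ hyk q hq) (lt_irrefl _)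
      simp [this]
    · have hhead : ¬ ∃ q ∈ (k1, v2) :: ys, q.1 = k1 ∧ q.2 ≠ v1 := by
        rintro ⟨q, hq, hq1, hq2⟩
        rcases List.mem_cons.mp hq with rfl | hq'
        · exact hq2 (by simp [hvv])
        · exact absurd (hq1 ▸ hyk q hq') (lt_irrefl _)
      rw [List.filter_cons_of_neg (by simpa using hhead), List.filter_congr ?_]
      intro p hp
      have hne : p.1 ≠ (k1, v2).1 := fun h => absurd (h ▸ hxk p hp) (lt_irrefl _)
      simp only [decide_eq_decide]
      exact (exists_cons_iff_of_ne hne).symm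

-- a key-sorted list of items with pairwise-distinct keys is strictly key-increasing
lemma pairwise_lt_of_le_nodup (l : List (String × Int))
    (h1 : l.Pairwise (fun a b => a.1 ≤ b.1)) (h2 : (l.map Prod.fst).Nodup) :
    l.Pairwise (fun a b => a.1 < b.1) := by
  have h3 : l.Pairwise (fun a b => a.1 ≠ b.1) := List.pairwise_map.mp h2
  exact (h1.and h3).imp (fun h => lt_of_le_of_ne h.1 h.2)

lemma sorted_items_pairwise (d : PySem.Dict String Int) (h : d.keys.Nodup) :
    (PySem.List.sorted d.items (fun kv => kv.1) false).Pairwise (fun a b => a.1 < b.1) := by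
  apply pairwise_lt_of_le_nodup
  · exact PySem.List.sorted_pairwise d.items (fun kv => kv.1)
  · exact ((PySem.List.sorted_perm d.items (fun kv => kv.1) false).map Prod.fst).nodup_iff.mpr h

-- A's "missing" set difference is a filter of legacy items, before sorting
lemma missing_eq (dl di : PySem.Dict String Int) (h : dl.keys.Nodup) :
    PySem.Set.diff (PySem.Set.ofList dl.keys) (PySem.Set.ofList di.keys)
      = (dl.items.filter (fun p => !(di.contains p.1))).map Prod.fst := by
  show (PySem.Set.ofList dl.keys).filter (fun k => !(PySem.Set.contains (PySem.Set.ofList di.keys) k)) = _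
  rw [PySem.Set.ofList_eq_self_of_nodup _ h,
      show PySem.Dict.keys dl = dl.items.map Prod.fst from rfl, List.filter_map]
  congr 1
  apply List.filter_congr
  intro p _
  simp [PySem.Dict.contains_eq_decide_mem_keys]

-- A's "extra" set difference is a filter of incremental keys, before sorting
lemma extra_eq (dl di : PySem.Dict String Int) (h : di.keys.Nodup) :
    PySem.Set.diff (PySem.Set.ofList di.keys) (PySem.Set.ofList dl.keys)
      = di.keys.filter (fun k => !(dl.contains k)) := by
  show (PySem.Set.ofList di.keys).filter (fun k => !(PySem.Set.contains (PySem.Set.ofList dl.keys) k)) = _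
  rw [PySem.Set.ofList_eq_self_of_nodup _ h]
  apply List.filter_congr
  intro k _
  simp [PySem.Dict.contains_eq_decide_mem_keys]

-- A's filtered intersection is a filter of legacy items, before sorting
lemma diffs_eq (dl di : PySem.Dict String Int) (h : dl.keys.Nodup) :
    (PySem.Set.inter (PySem.Set.ofList dl.keys) (PySem.Set.ofList di.keys)).filter
        (fun k => dl.get? k != di.get? k)
      = (dl.items.filter (fun p => di.contains p.1 && (some p.2 != di.get? p.1))).map Prod.fst := by
  show (((PySem.Set.ofList dl.keys).filter
          (fun k => PySem.Set.contains (PySem.Set.ofList di.keys) k)).filter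
          (fun k => dl.get? k != di.get? k)) = _
  rw [PySem.Set.ofList_eq_self_of_nodup _ h, List.filter_filter,
      show PySem.Dict.keys dl = dl.items.map Prod.fst from rfl, List.filter_map]
  congr 1
  apply List.filter_congr
  intro p hp
  have hget : dl.get? p.1 = some p.2 := by
    apply PySem.Dict.get?_of_mem_items _ _ h
    simpa using hp
  simp [PySem.Dict.contains_eq_decide_mem_keys, hget, Bool.and_comm]

theorem main_eq (l i : List (String × Int)) :
    build_shadow_mismatch_details_py l i = build_shadow_mismatch_details_py_alt l i := by
  have hdl : (PySem.Dict.ofList l).keys.Nodup := PySem.Dict.nodup_keys_ofList l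
  have hdi : (PySem.Dict.ofList i).keys.Nodup := PySem.Dict.nodup_keys_ofList i
  have hsl := sorted_items_pairwise (PySem.Dict.ofList l) hdl
  have hsi := sorted_items_pairwise (PySem.Dict.ofList i) hdi
  simp only [build_shadow_mismatch_details_py, build_shadow_mismatch_details_py_alt]
  rw [mergeClassify_eq _ _ hsl hsi]
  simp only [List.cons.injEq, Prod.mk.injEq, and_true]
  refine ⟨⟨trivial, ?_⟩, ⟨trivial, ?_⟩, trivial, ?_⟩
  · -- missing
    rw [missing_eq (PySem.Dict.ofList l) (PySem.Dict.ofList i) hdl]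
    apply PySem.List.sorted_eq_of_perm_of_pairwise_lt
    · have h1 : ∀ p ∈ PySem.List.sorted (PySem.Dict.ofList l).items (fun kv => kv.1) false,
          (!decide (p.1 ∈ (PySem.List.sorted (PySem.Dict.ofList i).items (fun kv => kv.1) false).map Prod.fst))
            = (!((PySem.Dict.ofList i).contains p.1)) := by
        intro p _
        have hmem := ((PySem.List.sorted_perm (PySem.Dict.ofList i).items (fun kv => kv.1) false).map Prod.fst).mem_iff (a := p.1)
        simp [PySem.Dict.contains_eq_decide_mem_keys, hmem, PySem.Dict.keys]
      rw [List.filter_congr h1]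
      exact ((PySem.List.sorted_perm (PySem.Dict.ofList l).items (fun kv => kv.1) false).filter _).map Prod.fst
    · exact List.pairwise_map.mpr (hsl.filter _)
  · -- extra
    rw [extra_eq (PySem.Dict.ofList l) (PySem.Dict.ofList i) hdi,
        show PySem.Dict.keys (PySem.Dict.ofList i) = (PySem.Dict.ofList i).items.map Prod.fst from rfl,
        List.filter_map]
    apply PySem.List.sorted_eq_of_perm_of_pairwise_lt
    · have h1 : ∀ p ∈ PySem.List.sorted (PySem.Dict.ofList i).items (fun kv => kv.1) false,
          (!decide (p.1 ∈ (PySem.List.sorted (PySem.Dict.ofList l).items (fun kv => kv.1) false).map Prod.fst))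
            = (!((PySem.Dict.ofList l).contains p.1)) := by
        intro p _
        have hmem := ((PySem.List.sorted_perm (PySem.Dict.ofList l).items (fun kv => kv.1) false).map Prod.fst).mem_iff (a := p.1)
        simp [PySem.Dict.contains_eq_decide_mem_keys, hmem, PySem.Dict.keys]
      rw [List.filter_congr h1]
      exact ((PySem.List.sorted_perm (PySem.Dict.ofList i).items (fun kv => kv.1) false).filter _).map Prod.fst
    · exact List.pairwise_map.mpr (hsi.filter _)
  · -- value differences
    rw [diffs_eq (PySem.Dict.ofList l) (PySem.Dict.ofList i) hdl]
    apply PySem.List.sorted_eq_of_perm_of_pairwise_lt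
    · have h3 : ∀ p ∈ PySem.List.sorted (PySem.Dict.ofList l).items (fun kv => kv.1) false,
          (decide (∃ q ∈ PySem.List.sorted (PySem.Dict.ofList i).items (fun kv => kv.1) false, q.1 = p.1 ∧ q.2 ≠ p.2))
            = ((PySem.Dict.ofList i).contains p.1 && (some p.2 != (PySem.Dict.ofList i).get? p.1)) := by
        intro p _
        have hperm := PySem.List.sorted_perm (PySem.Dict.ofList i).items (fun kv => kv.1) false
        have hiff : (∃ q ∈ PySem.List.sorted (PySem.Dict.ofList i).items (fun kv => kv.1) false, q.1 = p.1 ∧ q.2 ≠ p.2)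
            ↔ (p.1 ∈ (PySem.Dict.ofList i).keys ∧ ¬ some p.2 = (PySem.Dict.ofList i).get? p.1) := by
          constructor
          · rintro ⟨q, hq, hq1, hq2⟩
            have hqi : q ∈ (PySem.Dict.ofList i).items := hperm.subset hq
            have hget := PySem.Dict.get?_of_mem_items _ hqi hdi
            rw [hq1] at hget
            refine ⟨hq1 ▸ List.mem_map_of_mem hqi, ?_⟩
            rw [hget]
            simpa using fun h => hq2 h.symm
          · rintro ⟨hmem, hne⟩
            obtain ⟨q, hqi, hq1⟩ := List.mem_map.mp hmem
            have hget := PySem.Dict.get?_of_mem_items _ hqi hdi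
            rw [hq1] at hget
            refine ⟨q, hperm.mem_iff.mpr hqi, hq1, fun h => hne ?_⟩
            rw [hget, h]
        rw [PySem.Dict.contains_eq_decide_mem_keys]
        apply Bool.eq_iff_iff.mpr
        simp only [decide_eq_true_eq, Bool.and_eq_true, bne_iff_ne, hiff]
      rw [List.filter_congr h3]
      exact ((PySem.List.sorted_perm (PySem.Dict.ofList l).items (fun kv => kv.1) false).filter _).map Prod.fst
    · exact List.pairwise_map.mpr (hsl.filter _)

-- ===== VERDICT (by name: the statement is the Claim_ definition above) =====
theorem build_shadow_mismatch_details_py_spec : Claim_equal_build_shadow_mismatch_details_py := by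
  intro l i _
  unfold Spec_build_shadow_mismatch_details_py
  exact main_eq l i
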